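-- pv_equiv track=rewrite | github.com/jrdonat/Advent-of-Code-2024 | Solutions/Day 7/Part 2.py | generate_equation
-- ===== SOURCE A (Python) =====
-- import itertools
--
-- def generate_equation(string, operators):
--     indices = [i for i, char in enumerate(string) if char == ' ']
--
--     combos = itertools.product(operators, repeat=len(indices))
--
--     results = []
--     for combo in combos:
--         temp = list(string)
--         for index, replacement in zip(indices, combo):
--             temp[index] = replacement
--         results.append(''.join(temp))
--     return results
-- ===== SOURCE B (Python) =====
-- def generate_equation(string, operators):
--     segments = string.split(' ')
--     results = [segments[0]]
--     for seg in segments[1:]: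
--         results = [r + op + seg for r in results for op in operators]
--     return results
-- ===== Notes on version B (the rewrite author's own statement) =====
-- stated objective: simpler
-- what changed: B splits the string on ' ' once and grows the result list by a left fold over the segments (each step crosses current results with the operators), replacing A's space-index scan, itertools.product and per-combo char-list copy/overwrite.
import Mathlib
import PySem

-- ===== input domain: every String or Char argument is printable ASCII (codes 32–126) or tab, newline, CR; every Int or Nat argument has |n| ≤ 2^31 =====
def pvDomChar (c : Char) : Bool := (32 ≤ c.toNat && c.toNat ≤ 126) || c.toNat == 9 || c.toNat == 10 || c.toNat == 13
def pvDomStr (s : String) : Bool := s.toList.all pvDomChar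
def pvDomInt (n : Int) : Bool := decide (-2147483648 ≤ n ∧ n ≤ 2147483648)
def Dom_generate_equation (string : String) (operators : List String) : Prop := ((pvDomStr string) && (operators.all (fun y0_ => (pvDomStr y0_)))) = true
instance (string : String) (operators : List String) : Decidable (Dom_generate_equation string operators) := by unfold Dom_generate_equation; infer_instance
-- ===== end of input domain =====

-- B splits the string on ' ' once and builds results by a left fold over the segments
-- (crossing current results with the operators), instead of A's space-index scan +
-- itertools.product + per-combo char-list copy/overwrite; objective: simpler.


-- ===== PORT A =====
-- itertools.product(operators, repeat=n), in itertools order (first coordinate slowest)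
def prodRep (operators : List String) : Nat → List (List String)
  | 0 => [[]]
  | n + 1 => operators.flatMap (fun x => (prodRep operators n).map (x :: ·))

def generate_equation (string : String) (operators : List String) : List String :=
  let indices := ((PySem.List.enumerate string.toList).filter (fun p => p.2 == ' ')).map (·.1)
  let combos := prodRep operators indices.length
  combos.foldl (fun results combo =>
    let temp := string.toList.map (fun c => String.ofList [c])
    let temp := (indices.zip combo).foldl (fun t p => PySem.List.pySetD t p.1 p.2) temp
    results ++ [PySem.Str.join "" temp]) []

-- ===== PORT B =====
def generate_equation_alt (string : String) (operators : List String) : List String :=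
  let segments := string.toList.splitOn ' '
  ((segments.drop 1).foldl
      (fun results seg => results.flatMap (fun r => operators.map (fun op => r ++ op.toList ++ seg)))
      [segments.headD []]).map String.ofList

-- ===== PRECONDITION & SPEC =====
def Spec_generate_equation (string : String) (operators : List String) (out : List String) : Prop := out = generate_equation_alt string operators
instance (string : String) (operators : List String) (out : List String) : Decidable (Spec_generate_equation string operators out) := by unfold Spec_generate_equation; infer_instance

-- ===== CLAIM (what is proved, stated in full; the proofs are below) =====
def Claim_equal_generate_equation : Prop := ∀ (string : String) (operators : List String), Dom_generate_equation string operators → Spec_generate_equation string operators (generate_equation string operators)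

-- ===== LEMMAS AND PROOFS =====

-- indices of the spaces, as A computes them
def idxs (cs : List Char) : List Int :=
  ((PySem.List.enumerate cs).filter (fun p => p.2 == ' ')).map (·.1)

-- interleave a first segment, the remaining segments and the chosen operators
def weave (s0 : List Char) (rs : List (List Char)) (τ : List String) : List Char :=
  s0 ++ (τ.zip rs).flatMap (fun p => p.1.toList ++ p.2)

theorem enum_shift (cs : List Char) (s : Int) :
    PySem.List.enumerate cs (s + 1) = (PySem.List.enumerate cs s).map (fun p => (p.1 + 1, p.2)) := by
  induction cs generalizing s with
  | nil => simp [PySem.List.enumerate_nil]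
  | cons c cs ih =>
      rw [PySem.List.enumerate_cons, PySem.List.enumerate_cons, ih (s + 1)]
      simp

theorem idxs_cons (c : Char) (cs : List Char) :
    idxs (c :: cs) = (if c = ' ' then [0] else []) ++ (idxs cs).map (· + 1) := by
  unfold idxs
  rw [PySem.List.enumerate_cons]
  rw [show (0 : Int) + 1 = 0 + 1 from rfl, enum_shift]
  simp only [List.filter_cons, List.filter_map, List.map_map]
  by_cases h : c = ' ' <;> simp [h, Function.comp_def]

theorem idxs_nonneg (cs : List Char) : ∀ i ∈ idxs cs, 0 ≤ i := by
  induction cs with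
  | nil => simp [idxs, PySem.List.enumerate_nil]
  | cons c cs ih =>
      intro i hi
      rw [idxs_cons] at hi
      rcases List.mem_append.1 hi with h | h
      · by_cases hc : c = ' ' <;> simp [hc] at h; omega
      · obtain ⟨j, hj, rfl⟩ := List.mem_map.1 h
        have := ih j hj; omega

theorem fold_set_shift (pairs : List (Int × String)) (h : ∀ p ∈ pairs, 0 ≤ p.1)
    (x : String) (t : List String) :
    (pairs.map (fun p => (p.1 + 1, p.2))).foldl (fun t p => PySem.List.pySetD t p.1 p.2) (x :: t)
      = x :: pairs.foldl (fun t p => PySem.List.pySetD t p.1 p.2) t := by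
  induction pairs generalizing t with
  | nil => simp
  | cons p ps ih =>
      have hp : 0 ≤ p.1 := h p (by simp)
      have hset : PySem.List.pySetD (x :: t) (p.1 + 1) p.2 = x :: PySem.List.pySetD t p.1 p.2 := by
        rw [PySem.List.pySetD_of_nonneg _ _ (by omega), PySem.List.pySetD_of_nonneg _ _ hp]
        have : (p.1 + 1).toNat = p.1.toNat + 1 := by omega
        rw [this]; rfl
      simp only [List.map_cons, List.foldl_cons, hset]
      exact ih (fun q hq => h q (by simp [hq])) _

theorem join_nil_flatten (l : List (List Char)) : PySem.Chars.join [] l = l.flatten := by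
  induction l with
  | nil => simp [PySem.Chars.join_nil]
  | cons x xs ih =>
      cases xs with
      | nil => simp [PySem.Chars.join_singleton]
      | cons y ys => rw [PySem.Chars.join_cons_cons, List.flatten_cons, ← ih]; simp

theorem splitOn_length (cs : List Char) :
    (cs.splitOn ' ').length = (idxs cs).length + 1 := by
  induction cs with
  | nil => simp [idxs, PySem.List.enumerate_nil, List.splitOn]
  | cons c cs ih =>
      rw [idxs_cons]
      simp only [List.splitOn] at *
      rw [List.splitOnP_cons]
      by_cases h : c = ' ' <;> simp [h, List.length_modifyHead, ih]

-- A's per-combo value equals the woven segments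
theorem joinA_eq_weave (cs : List Char) (τ : List String)
    (h : τ.length = (idxs cs).length) :
    (List.map String.toList
        (((idxs cs).zip τ).foldl (fun t p => PySem.List.pySetD t p.1 p.2)
          (cs.map (fun c => String.ofList [c])))).flatten
      = weave ((cs.splitOn ' ').headD []) ((cs.splitOn ' ').drop 1) τ := by
  induction cs generalizing τ with
  | nil =>
      have hτ : τ = [] := by
        simpa [idxs, PySem.List.enumerate_nil] using List.length_eq_zero_iff.mp (by
          simpa [idxs, PySem.List.enumerate_nil] using h)
      subst hτ
      simp [idxs, PySem.List.enumerate_nil, List.splitOn, weave]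
  | cons c cs ih =>
      obtain ⟨hd, tl, hsplit⟩ := List.exists_cons_of_ne_nil (List.splitOnP_ne_nil (· == ' ') cs)
      by_cases hc : c = ' '
      · -- space: τ = o :: τ'
        rw [idxs_cons, if_pos hc] at h ⊢
        obtain ⟨o, τ', rfl⟩ : ∃ o τ', τ = o :: τ' := by
          cases τ with
          | nil => simp at h
          | cons o τ' => exact ⟨o, τ', rfl⟩
        have hlen : τ'.length = (idxs cs).length := by simpa using h
        simp only [List.cons_append, List.nil_append, List.zip_cons_cons, List.zip_map_left]
        have hzip : (List.map (Prod.map (· + 1) id) ((idxs cs).zip τ'))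
            = ((idxs cs).zip τ').map (fun p => (p.1 + 1, p.2)) := by
          simp [Prod.map]
        rw [List.foldl_cons, hzip]
        have hset0 : PySem.List.pySetD ((c :: cs).map (fun c => String.ofList [c])) 0 o
            = o :: cs.map (fun c => String.ofList [c]) := by
          rw [PySem.List.pySetD_of_nonneg _ _ (by omega)]; rfl
        rw [hset0, fold_set_shift _ (by intro p hp; exact idxs_nonneg cs p.1 (List.of_mem_zip hp).1)]
        rw [List.map_cons, List.flatten_cons, ih τ' hlen]
        -- the split side
        have : (c :: cs).splitOn ' ' = [] :: cs.splitOn ' ' := by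
          simp only [List.splitOn]; rw [List.splitOnP_cons]; simp [hc]
        rw [this]
        simp only [List.splitOn]
        rw [hsplit]
        simp [weave]
      · rw [idxs_cons, if_neg hc] at h ⊢
        simp only [List.nil_append] at h ⊢
        have hlen : τ.length = (idxs cs).length := by simpa using h
        rw [List.zip_map_left]
        have hzip : (List.map (Prod.map (· + 1) id) ((idxs cs).zip τ))
            = ((idxs cs).zip τ).map (fun p => (p.1 + 1, p.2)) := by
          simp [Prod.map]
        rw [hzip, List.map_cons, fold_set_shift _ (by intro p hp; exact idxs_nonneg cs p.1 (List.of_mem_zip hp).1)]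
        rw [List.map_cons, List.flatten_cons, ih τ hlen]
        have : (c :: cs).splitOn ' ' = (cs.splitOn ' ').modifyHead (c :: ·) := by
          simp only [List.splitOn]; rw [List.splitOnP_cons]; simp [hc]
        rw [this]
        simp only [List.splitOn]
        rw [hsplit]
        simp [weave]

theorem prodRep_length_mem (ops : List String) (n : Nat) :
    ∀ τ ∈ prodRep ops n, τ.length = n := by
  induction n with
  | zero => simp [prodRep]
  | succ n ih =>
      intro τ hτ
      simp only [prodRep, List.mem_flatMap, List.mem_map] at hτ
      obtain ⟨x, _, t, ht, rfl⟩ := hτ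
      simp [ih t ht]

theorem prodRep_snoc (ops : List String) (n : Nat) :
    prodRep ops (n + 1) = (prodRep ops n).flatMap (fun t => ops.map (fun o => t ++ [o])) := by
  induction n with
  | zero => simp [prodRep, List.map_eq_flatMap]
  | succ n ih =>
      calc prodRep ops (n + 1 + 1)
          = ops.flatMap (fun x => (prodRep ops (n + 1)).map (x :: ·)) := rfl
        _ = ops.flatMap (fun x => ((prodRep ops n).flatMap (fun t => ops.map (fun o => t ++ [o]))).map (x :: ·)) := by rw [ih]
        _ = (ops.flatMap (fun x => (prodRep ops n).map (x :: ·))).flatMap (fun t => ops.map (fun o => t ++ [o])) := by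
            simp [List.flatMap_assoc, List.map_flatMap, List.flatMap_map, List.map_map, Function.comp_def, List.cons_append]
        _ = (prodRep ops (n + 1)).flatMap (fun t => ops.map (fun o => t ++ [o])) := rfl

theorem foldl_append_map' {α β : Type} (f : α → β) (l : List α) (acc : List β) :
    l.foldl (fun r c => r ++ [f c]) acc = acc ++ l.map f := by
  induction l generalizing acc with
  | nil => simp
  | cons x xs ih => simp [ih]

theorem weave_snoc (s0 : List Char) (rs : List (List Char)) (seg : List Char)
    (τ : List String) (o : String) (h : τ.length = rs.length) :
    weave s0 (rs ++ [seg]) (τ ++ [o]) = weave s0 rs τ ++ o.toList ++ seg := by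
  unfold weave
  rw [List.zip_append h, List.flatMap_append]
  simp

theorem B_fold (ops : List String) (s0 : List Char) (rs : List (List Char)) :
    rs.foldl (fun results seg => results.flatMap (fun r => ops.map (fun op => r ++ op.toList ++ seg))) [s0]
      = (prodRep ops rs.length).map (weave s0 rs) := by
  induction rs using List.reverseRecOn with
  | nil => simp [prodRep, weave]
  | append_singleton rs seg ih =>
      rw [List.foldl_append, ih]
      simp only [List.foldl_cons, List.foldl_nil]
      rw [List.length_append, List.length_cons, List.length_nil, prodRep_snoc]
      rw [List.flatMap_map, List.map_flatMap]
      apply List.flatMap_congr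
      intro t ht
      have hlen := prodRep_length_mem ops rs.length t ht
      rw [List.map_map]
      apply List.map_congr_left
      intro o _
      exact (weave_snoc s0 rs seg t o hlen).symm

-- ===== VERDICT (by name: the statement is the Claim_ definition above) =====
theorem idxs_def (cs : List Char) :
    ((PySem.List.enumerate cs).filter (fun p => p.2 == ' ')).map (·.1) = idxs cs := rfl

theorem generate_equation_spec : Claim_equal_generate_equation := by
  intro string ops _dom
  unfold Spec_generate_equation generate_equation generate_equation_alt
  simp only [idxs_def]
  rw [foldl_append_map']
  obtain ⟨hd, tl, hsplit⟩ := List.exists_cons_of_ne_nil (List.splitOnP_ne_nil (· == ' ') string.toList)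
  have hsplit' : string.toList.splitOn ' ' = hd :: tl := by simpa [List.splitOn] using hsplit
  have hlen : tl.length = (idxs string.toList).length := by
    have := splitOn_length string.toList
    rw [hsplit'] at this
    simpa using this
  rw [hsplit']
  simp only [List.headD, List.drop, List.nil_append]
  rw [B_fold, hlen]
  rw [List.map_map]
  apply List.map_congr_left
  intro τ hτ
  have hτlen : τ.length = (idxs string.toList).length :=
    prodRep_length_mem ops _ τ hτ
  have hmain := joinA_eq_weave string.toList τ hτlen
  rw [hsplit'] at hmain
  simp only [List.headD, List.drop] at hmain
  show PySem.Str.join "" _ = String.ofList (weave hd tl τ)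
  rw [PySem.Str.join]
  congr 1
  have hnil : ("" : String).toList = [] := rfl
  rw [hnil, join_nil_flatten, ← hmain]
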